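-- pv_equiv track=rewrite | github.com/BNukhkadiev/Knowledge-Graphs | src/protograph/maschine_init.py | _ancestors_generalizations
-- ===== SOURCE A (Python) =====
-- def _ancestors_generalizations(node: str, parents: dict[str, set[str]]) -> set[str]:
--     """All classes reachable from ``node`` by walking up ``subClassOf`` (including ``node``)."""
--     out: set[str] = set()
--     stack = [node]
--     while stack:
--         cur = stack.pop()
--         if cur in out:
--             continue
--         out.add(cur)
--         stack.extend(parents.get(cur, ()))
--     return out
-- ===== SOURCE B (Python) =====
-- def _ancestors_generalizations(node: str, parents: dict[str, set[str]]) -> set[str]: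
--     """Recursive DFS: the accumulating set is both result and visited guard."""
--     out: set[str] = set()
--
--     def visit(cur: str) -> None:
--         if cur in out:
--             return
--         out.add(cur)
--         for p in parents.get(cur, ()):
--             visit(p)
--
--     visit(node)
--     return out
-- ===== Notes on version B (the rewrite author's own statement) =====
-- stated objective: alternative
-- what changed: The explicit worklist (stack + pop/extend loop) is replaced by a recursive DFS helper that uses the call stack; the accumulating set serves as both result and visited guard.
import Mathlib
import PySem

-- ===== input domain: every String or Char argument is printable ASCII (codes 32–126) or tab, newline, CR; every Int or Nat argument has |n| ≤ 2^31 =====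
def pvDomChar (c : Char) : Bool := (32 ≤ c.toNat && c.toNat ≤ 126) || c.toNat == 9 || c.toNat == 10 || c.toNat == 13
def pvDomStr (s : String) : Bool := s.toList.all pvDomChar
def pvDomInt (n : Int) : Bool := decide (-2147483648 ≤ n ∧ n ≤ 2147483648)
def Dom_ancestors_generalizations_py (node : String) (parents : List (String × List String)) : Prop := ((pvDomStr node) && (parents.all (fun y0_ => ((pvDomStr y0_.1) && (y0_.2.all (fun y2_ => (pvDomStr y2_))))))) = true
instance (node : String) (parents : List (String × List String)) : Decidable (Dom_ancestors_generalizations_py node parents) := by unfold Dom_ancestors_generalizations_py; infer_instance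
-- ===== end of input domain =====

-- B replaces A's explicit stack loop by a recursive DFS helper (call-stack recursion);
-- the returned value is a Python set, so iteration order over parent sets is immaterial.


-- ===== PORT A =====
-- parents.get(cur, ()) : association-list lookup (first match), default empty
def pvParentsGetA (parents : List (String × List String)) (cur : String) : List String :=
  ((PySem.Dict.mk parents).get? cur).getD []

-- the while-loop over the explicit stack (top of stack = head of the list; Python's
-- set iteration order when extending the stack is unspecified, the port uses list order).
-- The loop always terminates because `out` only grows; the port makes this structural
-- with a fuel counter that provably never runs out (each element is pushed at most
-- once per distinct visited node, so total pops ≤ total pushes ≤ 1 + Σ value lengths).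
def pvLoopA (parents : List (String × List String)) :
    Nat → List String → PySem.Set String → PySem.Set String
  | 0, _, out => out
  | _ + 1, [], out => out
  | f + 1, cur :: rest, out =>
    if PySem.Set.contains out cur then
      pvLoopA parents f rest out
    else
      pvLoopA parents f (pvParentsGetA parents cur ++ rest) (PySem.Set.add out cur)

def ancestors_generalizations_py (node : String) (parents : List (String × List String)) : List String :=
  pvLoopA parents ((parents.flatMap (fun kv => kv.2)).length + 1) [node] PySem.Set.empty

-- ===== PORT B =====
def pvParentsGetB (parents : List (String × List String)) (cur : String) : List String :=
  ((PySem.Dict.mk parents).get? cur).getD []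

-- recursive DFS `visit`, with the inner `for p in parents.get(cur, ()): visit(p)` loop
-- as `pvVisitList`.  The recursion terminates because `out` only grows; the port makes
-- this structural with the same fuel counter as the A-side (one unit per `visit` call;
-- the `min` only serves the termination measure and is provably the identity).
-- termination helper for the fuel/worklist lexicographic measure (cited in decreasing_by)
theorem pvLexLe {a b c d : Nat} (h : a ≤ c) (h2 : b < d) :
    Prod.Lex (fun a₁ a₂ => a₁ < a₂) (fun a₁ a₂ => a₁ < a₂) (a, b) (c, d) := by
  rcases Nat.lt_or_ge a c with h' | h'
  · exact Prod.Lex.left _ _ h'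
  · have : a = c := Nat.le_antisymm h h'
    subst this
    exact Prod.Lex.right _ h2

mutual
  def pvVisitB (parents : List (String × List String)) (f : Nat) (cur : String)
      (out : PySem.Set String) : Nat × PySem.Set String :=
    match f with
    | 0 => (0, out)
    | f + 1 =>
      if PySem.Set.contains out cur then (f, out)
      else pvVisitList parents f (pvParentsGetB parents cur) (PySem.Set.add out cur)
  termination_by (f, 0)
  decreasing_by
    exact Prod.Lex.left _ _ (Nat.lt_succ_self f)

  def pvVisitList (parents : List (String × List String)) (f : Nat) (l : List String)
      (out : PySem.Set String) : Nat × PySem.Set String :=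
    match l with
    | [] => (f, out)
    | p :: ps =>
      let r := pvVisitB parents f p out
      pvVisitList parents (min r.1 f) ps r.2
  termination_by (f, l.length + 1)
  decreasing_by
    · exact pvLexLe (Nat.le_refl f) (by simp)
    · exact pvLexLe (Nat.min_le_right _ _) (by simp [List.length_cons])
end

def ancestors_generalizations_py_alt (node : String) (parents : List (String × List String)) : List String :=
  (pvVisitB parents ((parents.flatMap (fun kv => kv.2)).length + 1) node PySem.Set.empty).2

-- ===== PRECONDITION & SPEC =====
def Spec_ancestors_generalizations_py (node : String) (parents : List (String × List String)) (out : List String) : Prop := out = ancestors_generalizations_py_alt node parents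
instance (node : String) (parents : List (String × List String)) (out : List String) : Decidable (Spec_ancestors_generalizations_py node parents out) := by unfold Spec_ancestors_generalizations_py; infer_instance

-- ===== CLAIM (what is proved, stated in full; the proofs are below) =====
def Claim_equal_ancestors_generalizations_py : Prop := ∀ (node : String) (parents : List (String × List String)), Dom_ancestors_generalizations_py node parents → Spec_ancestors_generalizations_py node parents (ancestors_generalizations_py node parents)

-- ===== LEMMAS AND PROOFS =====

-- the returned fuel never exceeds the supplied fuel
theorem pvVisitList_fst_le (parents : List (String × List String)) (l : List String) :
    ∀ (f : Nat) (out : PySem.Set String), (pvVisitList parents f l out).1 ≤ f := by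
  induction l with
  | nil => intro f out; simp [pvVisitList]
  | cons p ps ih =>
    intro f out
    rw [pvVisitList]
    exact Nat.le_trans (ih _ _) (Nat.min_le_right _ _)

-- with zero fuel the DFS returns its accumulator unchanged
theorem pvVisitList_zero (parents : List (String × List String)) (l : List String) :
    ∀ out : PySem.Set String, pvVisitList parents 0 l out = (0, out) := by
  induction l with
  | nil => intro out; simp [pvVisitList]
  | cons p ps ih => intro out; rw [pvVisitList]; simp [pvVisitB, ih]

-- the DFS sequences over an appended worklist
theorem pvVisitList_append (parents : List (String × List String)) (l1 l2 : List String) :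
    ∀ (f : Nat) (out : PySem.Set String),
      pvVisitList parents f (l1 ++ l2) out =
        pvVisitList parents (pvVisitList parents f l1 out).1 l2 (pvVisitList parents f l1 out).2 := by
  induction l1 with
  | nil => intro f out; simp [pvVisitList]
  | cons p ps ih =>
    intro f out
    rw [List.cons_append, pvVisitList, ih, pvVisitList]

-- main simulation: the stack loop computes exactly the threaded DFS over the same worklist
theorem pvLoopA_eq_visitList (parents : List (String × List String)) :
    ∀ (f : Nat) (stack : List String) (out : PySem.Set String),
      pvLoopA parents f stack out = (pvVisitList parents f stack out).2 := by
  intro f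
  induction f with
  | zero => intro stack out; rw [pvLoopA, pvVisitList_zero]
  | succ f ih =>
    intro stack out
    cases stack with
    | nil => simp [pvLoopA, pvVisitList]
    | cons cur rest =>
      rw [pvLoopA, pvVisitList, pvVisitB]
      split
      · have hmin : min f (f + 1) = f := Nat.min_eq_left (Nat.le_succ f)
        simp only [hmin]
        exact ih rest out
      · have hle : (pvVisitList parents f (pvParentsGetB parents cur)
            (PySem.Set.add out cur)).1 ≤ f + 1 :=
          Nat.le_trans (pvVisitList_fst_le _ _ _ _) (Nat.le_succ f)
        have hmin : min (pvVisitList parents f (pvParentsGetB parents cur)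
            (PySem.Set.add out cur)).1 (f + 1) =
            (pvVisitList parents f (pvParentsGetB parents cur) (PySem.Set.add out cur)).1 :=
          Nat.min_eq_left hle
        simp only [hmin]
        rw [ih, pvVisitList_append]
        rfl

-- ===== VERDICT (by name: the statement is the Claim_ definition above) =====
theorem ancestors_generalizations_py_spec : Claim_equal_ancestors_generalizations_py := by
  intro node parents _
  unfold Spec_ancestors_generalizations_py ancestors_generalizations_py ancestors_generalizations_py_alt
  rw [pvLoopA_eq_visitList, pvVisitList, pvVisitList]
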